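-- pv_equiv track=rewrite | github.com/pendulating/trawler | dagspaces/goldcoin_hipaa/stages/parse_responses.py | first_compliance_result
-- ===== SOURCE A (Python) =====
-- from typing import Optional
--
-- def first_compliance_result(response: str) -> Optional[str]:
--     """Find the first compliance keyword in the response."""
--     permit_keywords = [
--         "permit", "permis", "complies with", "not violat",
--         "allow", "not explicitly prohibit", "not forbid",
--     ]
--     forbid_keywords = [
--         "forbid", "not permit", "prohibit", "not comply",
--         "not fully comply", "violat",
--     ]
--     all_labels = permit_keywords + forbid_keywords
--
--     first_index = len(response)
--     first_label = ""
--     for label in all_labels: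
--         if label in response:
--             idx = response.index(label)
--             if idx < first_index:
--                 first_index = idx
--                 first_label = label
--
--     if first_label in permit_keywords:
--         return "Permit"
--     elif first_label in forbid_keywords:
--         return "Forbid"
--     return None
-- ===== SOURCE B (Python) =====
-- from typing import Optional
--
-- def first_compliance_result(response: str) -> Optional[str]:
--     """Scan the response left to right; classify at the first position where
--     any compliance keyword starts (permit keywords checked first at each position)."""
--     permit_keywords = [
--         "permit", "permis", "complies with", "not violat",
--         "allow", "not explicitly prohibit", "not forbid",
--     ]
--     forbid_keywords = [
--         "forbid", "not permit", "prohibit", "not comply",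
--         "not fully comply", "violat",
--     ]
--     for i in range(len(response)):
--         if any(response.startswith(k, i) for k in permit_keywords):
--             return "Permit"
--         if any(response.startswith(k, i) for k in forbid_keywords):
--             return "Forbid"
--     return None
-- ===== Notes on version B (the rewrite author's own statement) =====
-- stated objective: alternative
-- what changed: A iterates over the keywords, calling substring search for each and tracking the globally minimal match index plus the winning label, then classifies the label by list membership; B never searches for any keyword: it scans the response positions left to right once and at each position tests whether some permit (then forbid) keyword starts there, returning the category at the first matching position and never tracking a label or an index.
import Mathlib
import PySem

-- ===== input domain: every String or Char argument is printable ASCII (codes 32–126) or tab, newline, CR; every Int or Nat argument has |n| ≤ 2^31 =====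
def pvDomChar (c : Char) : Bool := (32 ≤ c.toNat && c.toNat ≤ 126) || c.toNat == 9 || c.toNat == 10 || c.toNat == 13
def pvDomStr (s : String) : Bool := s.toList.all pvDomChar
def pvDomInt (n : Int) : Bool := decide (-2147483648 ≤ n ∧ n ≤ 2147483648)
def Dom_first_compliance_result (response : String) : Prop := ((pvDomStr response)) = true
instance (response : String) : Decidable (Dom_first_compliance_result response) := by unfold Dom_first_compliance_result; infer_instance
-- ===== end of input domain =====

-- B replaces A's loop over keywords (substring search per keyword, tracking the minimal
-- match index and winning label) with a single left-to-right scan over the response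
-- positions, classifying at the first position where any keyword starts; objective: alternative.

-- ===== PORT A =====
def pvPermitA : List String :=
  ["permit", "permis", "complies with", "not violat",
   "allow", "not explicitly prohibit", "not forbid"]

def pvForbidA : List String :=
  ["forbid", "not permit", "prohibit", "not comply",
   "not fully comply", "violat"]

-- response.index(label) is only evaluated under 'label in response', where it equals find
def first_compliance_result (response : String) : Option String :=
  let allLabels := pvPermitA ++ pvForbidA
  let st := allLabels.foldl
    (fun (st : Int × String) label =>
      if PySem.Str.isIn label response then
        let idx := PySem.Str.find response label
        if idx < st.1 then (idx, label) else st
      else st)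
    (PySem.Str.len response, "")
  if pvPermitA.contains st.2 then some "Permit"
  else if pvForbidA.contains st.2 then some "Forbid"
  else none

-- ===== PORT B =====
def pvPermitB : List String :=
  ["permit", "permis", "complies with", "not violat",
   "allow", "not explicitly prohibit", "not forbid"]

def pvForbidB : List String :=
  ["forbid", "not permit", "prohibit", "not comply",
   "not fully comply", "violat"]

-- the 'for i in range(len(response))' loop as structural recursion over the tails of the
-- string; response.startswith(k, i) is PySem.Chars.startswith applied to the i-th tail
def pvScanB : List Char → Option String
  | [] => none
  | c :: rest =>
      if pvPermitB.any (fun k => PySem.Chars.startswith (c :: rest) k.toList) then some "Permit"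
      else if pvForbidB.any (fun k => PySem.Chars.startswith (c :: rest) k.toList) then some "Forbid"
      else pvScanB rest

def first_compliance_result_alt (response : String) : Option String :=
  pvScanB response.toList

-- ===== PRECONDITION & SPEC =====
def Spec_first_compliance_result (response : String) (out : Option String) : Prop := out = first_compliance_result_alt response
instance (response : String) (out : Option String) : Decidable (Spec_first_compliance_result response out) := by unfold Spec_first_compliance_result; infer_instance

-- ===== CLAIM (what is proved, stated in full; the proofs are below) =====
def Claim_equal_first_compliance_result : Prop := ∀ (response : String), Dom_first_compliance_result response → Spec_first_compliance_result response (first_compliance_result response)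

-- ===== LEMMAS AND PROOFS =====

-- the effective index of a keyword: its find result, or len(response) when absent
def pvG (s : String) (k : String) : Int :=
  if 0 ≤ PySem.Str.find s k then PySem.Str.find s k else PySem.Str.len s

-- A's loop body
def pvStepA (s : String) (st : Int × String) (label : String) : Int × String :=
  if PySem.Str.isIn label s then
    let idx := PySem.Str.find s label
    if idx < st.1 then (idx, label) else st
  else st

def pvGmin (s : String) (a : Int) (k : String) : Int := min a (pvG s k)

-- Chars-level copies of pvG / pvGmin, for the induction over the tails of the string
def pvGc (l : List Char) (k : String) : Int :=
  if 0 ≤ PySem.Chars.find l k.toList then PySem.Chars.find l k.toList else (l.length : Int)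

def pvGminc (l : List Char) (a : Int) (k : String) : Int := min a (pvGc l k)

lemma pv_stepA_eq (s : String) (st : Int × String) (k : String)
    (hm : st.1 ≤ PySem.Str.len s) :
    pvStepA s st k = (pvGmin s st.1 k, if pvG s k < st.1 then k else st.2) := by
  unfold pvStepA pvGmin pvG
  simp only [PySem.Str.find_eq, PySem.Str.len_eq] at hm ⊢
  by_cases h : 0 ≤ PySem.Chars.find s.toList k.toList
  · have hin : PySem.Str.isIn k s = true := by
      rw [PySem.Str.isIn_iff_infix, ← PySem.Chars.find_nonneg_iff]; exact h
    rw [hin, if_pos rfl, if_pos h]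
    by_cases h2 : PySem.Chars.find s.toList k.toList < st.1
    · rw [if_pos h2, if_pos h2, min_eq_right (le_of_lt h2)]
    · rw [if_neg h2, if_neg h2, min_eq_left (le_of_not_gt h2)]
  · have hin : PySem.Str.isIn k s = false := by
      rw [← Bool.not_eq_true, PySem.Str.isIn_iff_infix, ← PySem.Chars.find_nonneg_iff]; exact h
    rw [hin, if_neg (by simp), if_neg h, min_eq_left hm,
        if_neg (not_lt.mpr hm)]

lemma pv_foldl_gmin_le (s : String) (keys : List String) :
    ∀ a : Int, keys.foldl (pvGmin s) a ≤ a := by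
  induction keys with
  | nil => intro a; exact le_refl _
  | cons k keys ih =>
      intro a
      calc (k :: keys).foldl (pvGmin s) a = keys.foldl (pvGmin s) (pvGmin s a k) := rfl
        _ ≤ pvGmin s a k := ih _
        _ ≤ a := min_le_left _ _

lemma pv_foldl_gmin_swap (s : String) (keys : List String) :
    ∀ a b : Int, keys.foldl (pvGmin s) (min a b) = min a (keys.foldl (pvGmin s) b) := by
  induction keys with
  | nil => intro a b; rfl
  | cons k keys ih =>
      intro a b
      have : pvGmin s (min a b) k = min a (pvGmin s b k) := by
        unfold pvGmin; rw [min_assoc]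
      calc (k :: keys).foldl (pvGmin s) (min a b)
          = keys.foldl (pvGmin s) (pvGmin s (min a b) k) := rfl
        _ = keys.foldl (pvGmin s) (min a (pvGmin s b k)) := by rw [this]
        _ = min a (keys.foldl (pvGmin s) (pvGmin s b k)) := ih _ _
        _ = min a ((k :: keys).foldl (pvGmin s) b) := rfl

-- characterisation of A's fold: its index is the running min of pvG, and its label is
-- unchanged iff no strict improvement happened (in which case the index stays m)
lemma pv_foldA (s : String) (keys : List String) :
    ∀ (m : Int) (l : String), m ≤ PySem.Str.len s →
    (keys.foldl (pvStepA s) (m, l)).1 = keys.foldl (pvGmin s) m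
    ∧ ((keys.foldl (pvStepA s) (m, l)).1 = m → (keys.foldl (pvStepA s) (m, l)).2 = l)
    ∧ ((keys.foldl (pvStepA s) (m, l)).1 < m → (keys.foldl (pvStepA s) (m, l)).2 ∈ keys) := by
  induction keys with
  | nil => intro m l _; exact ⟨rfl, fun _ => rfl, fun h => absurd h (lt_irrefl m)⟩
  | cons k keys ih =>
      intro m l hm
      have hstep := pv_stepA_eq s (m, l) k hm
      have hfold : (k :: keys).foldl (pvStepA s) (m, l)
          = keys.foldl (pvStepA s) (pvGmin s m k, if pvG s k < m then k else l) := by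
        rw [List.foldl_cons, hstep]
      have hgm : pvGmin s m k ≤ PySem.Str.len s := le_trans (min_le_left _ _) hm
      obtain ⟨h1, h2, h3⟩ := ih (pvGmin s m k) (if pvG s k < m then k else l) hgm
      have hle : (keys.foldl (pvStepA s) (pvGmin s m k, if pvG s k < m then k else l)).1
          ≤ pvGmin s m k := by
        rw [h1]; exact pv_foldl_gmin_le s keys _
      have hminle : pvGmin s m k ≤ m := min_le_left _ _
      refine ⟨?_, ?_, ?_⟩
      · rw [hfold, h1]; rfl
      · intro heq
        rw [hfold] at heq ⊢
        have hgeq : pvGmin s m k = m := by omega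
        have hnolt : ¬ pvG s k < m := by
          have := min_le_right m (pvG s k)
          unfold pvGmin at hgeq
          omega
        rw [h2 (by omega), if_neg hnolt]
      · intro hlt
        rw [hfold] at hlt ⊢
        rcases lt_or_eq_of_le hle with hc | hc
        · exact List.mem_cons_of_mem _ (h3 hc)
        · rw [h2 hc]
          by_cases hg : pvG s k < m
          · rw [if_pos hg]; exact List.mem_cons_self ..
          · exfalso
            have : pvGmin s m k = m := by
              unfold pvGmin; exact min_eq_left (le_of_not_gt hg)
            omega

-- the Str-level fold over pvGmin is the Chars-level one
lemma pv_gmin_eq (s : String) : pvGmin s = pvGminc s.toList := by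
  funext a k
  unfold pvGmin pvGminc pvG pvGc
  rw [PySem.Str.find_eq, PySem.Str.len_eq]

-- how Chars.find steps past the head of the string
lemma pv_find_cons (c : Char) (l k : List Char) :
    PySem.Chars.find (c :: l) k
      = if k <+: (c :: l) then 0
        else (if PySem.Chars.find l k = -1 then -1 else 1 + PySem.Chars.find l k) := by
  by_cases hp : k <+: (c :: l)
  · rw [if_pos hp]
    have hinf : k <:+: (c :: l) := hp.isInfix
    have h0 : 0 ≤ PySem.Chars.find (c :: l) k := (PySem.Chars.find_nonneg_iff _ _).mpr hinf
    obtain ⟨-, hmin⟩ := PySem.Chars.find_spec h0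
    by_contra hne
    have ht : 0 < (PySem.Chars.find (c :: l) k).toNat := by omega
    exact hmin 0 ht (by simpa using hp)
  · rw [if_neg hp]
    by_cases hi : k <:+: l
    · have hli : k <:+: (c :: l) := List.infix_cons_iff.mpr (Or.inr hi)
      have h0 : 0 ≤ PySem.Chars.find (c :: l) k := (PySem.Chars.find_nonneg_iff _ _).mpr hli
      have h0' : 0 ≤ PySem.Chars.find l k := (PySem.Chars.find_nonneg_iff _ _).mpr hi
      obtain ⟨hpre, hmin⟩ := PySem.Chars.find_spec h0
      obtain ⟨hpre', hmin'⟩ := PySem.Chars.find_spec h0'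
      set t := (PySem.Chars.find (c :: l) k).toNat with ht
      set u := (PySem.Chars.find l k).toNat with hu
      have htpos : 0 < t := by
        rcases Nat.eq_zero_or_pos t with h | h
        · exfalso; apply hp; simpa [h] using hpre
        · exact h
      have hdrop : k <+: l.drop (t - 1) := by
        have : (c :: l).drop t = l.drop (t - 1) := by
          conv_lhs => rw [show t = (t - 1) + 1 by omega]
          exact List.drop_succ_cons
        rwa [this] at hpre
      have hut : u ≤ t - 1 := by
        by_contra h
        exact hmin' (t - 1) (by omega) hdrop
      have htu : t ≤ u + 1 := by
        by_contra h
        exact hmin (u + 1) (by omega) (by simpa [List.drop_succ_cons] using hpre')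
      have hfind : PySem.Chars.find (c :: l) k = 1 + PySem.Chars.find l k := by omega
      rw [if_neg (by omega), hfind]
    · have h1 : PySem.Chars.find l k = -1 := (PySem.Chars.find_eq_neg_one_iff _ _).mpr hi
      have h2 : PySem.Chars.find (c :: l) k = -1 := by
        rw [PySem.Chars.find_eq_neg_one_iff]
        intro h
        rcases List.infix_cons_iff.mp h with h | h
        · exact hp h
        · exact hi h
      rw [h1, h2, if_pos rfl]

-- pvGc is nonnegative, so the min fold stays nonnegative
lemma pv_gc_nonneg (l : List Char) (k : String) : 0 ≤ pvGc l k := by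
  unfold pvGc
  split_ifs with h
  · exact h
  · exact Int.natCast_nonneg _

lemma pv_foldl_gminc_nonneg (l : List Char) (keys : List String) :
    ∀ a : Int, 0 ≤ a → 0 ≤ keys.foldl (pvGminc l) a := by
  induction keys with
  | nil => intro a ha; exact ha
  | cons k keys ih =>
      intro a ha
      exact ih _ (le_min ha (pv_gc_nonneg l k))

lemma pv_foldl_gminc_le (l : List Char) (keys : List String) :
    ∀ a : Int, keys.foldl (pvGminc l) a ≤ a := by
  induction keys with
  | nil => intro a; exact le_refl _
  | cons k keys ih =>
      intro a
      calc (k :: keys).foldl (pvGminc l) a = keys.foldl (pvGminc l) (pvGminc l a k) := rfl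
        _ ≤ pvGminc l a k := ih _
        _ ≤ a := min_le_left _ _

lemma pv_foldl_gminc_le_mem (l : List Char) (keys : List String) :
    ∀ a : Int, ∀ k ∈ keys, keys.foldl (pvGminc l) a ≤ pvGc l k := by
  induction keys with
  | nil => intro a k hk; exact absurd hk (List.not_mem_nil)
  | cons k' keys ih =>
      intro a k hk
      rcases List.mem_cons.mp hk with h | h
      · subst h
        calc (k :: keys).foldl (pvGminc l) a
            = keys.foldl (pvGminc l) (pvGminc l a k) := rfl
          _ ≤ pvGminc l a k := pv_foldl_gminc_le l keys _
          _ ≤ pvGc l k := min_le_right _ _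
      · exact ih (pvGminc l a k') k h

-- when no keyword of the group starts at the head, the group's min shifts by one
lemma pv_foldl_gminc_cons_shift (c : Char) (l : List Char) (keys : List String)
    (h : ∀ k ∈ keys, ¬ k.toList <+: (c :: l)) :
    ∀ a : Int, keys.foldl (pvGminc (c :: l)) (1 + a) = 1 + keys.foldl (pvGminc l) a := by
  induction keys with
  | nil => intro a; rfl
  | cons k keys ih =>
      intro a
      have hk : ¬ k.toList <+: (c :: l) := h k (List.mem_cons_self ..)
      have hstep : pvGminc (c :: l) (1 + a) k = 1 + pvGminc l a k := by
        have hg : pvGc (c :: l) k = 1 + pvGc l k := by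
          unfold pvGc
          rw [pv_find_cons, if_neg hk]
          by_cases hf : PySem.Chars.find l k.toList = -1
          · rw [if_pos hf, hf, if_neg (by omega), if_neg (by omega)]
            simp
            omega
          · have h0 : 0 ≤ PySem.Chars.find l k.toList := by
              have := PySem.Chars.neg_one_le_find l k.toList
              omega
            rw [if_neg hf, if_pos (by omega), if_pos h0]
        unfold pvGminc
        rw [hg]
        omega
      calc (k :: keys).foldl (pvGminc (c :: l)) (1 + a)
          = keys.foldl (pvGminc (c :: l)) (pvGminc (c :: l) (1 + a) k) := rfl
        _ = keys.foldl (pvGminc (c :: l)) (1 + pvGminc l a k) := by rw [hstep]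
        _ = 1 + keys.foldl (pvGminc l) (pvGminc l a k) := ih (fun k hk => h k (List.mem_cons_of_mem _ hk)) _
        _ = 1 + (k :: keys).foldl (pvGminc l) a := rfl

-- when some keyword of the group starts at the head, the group's min is 0
lemma pv_foldl_gminc_cons_zero (c : Char) (l : List Char) (keys : List String)
    (k : String) (hk : k ∈ keys) (h : k.toList <+: (c :: l)) (a : Int) (ha : 0 ≤ a) :
    keys.foldl (pvGminc (c :: l)) a = 0 := by
  have h0 : pvGc (c :: l) k = 0 := by
    unfold pvGc
    rw [pv_find_cons, if_pos h, if_pos (le_refl 0)]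
  have hle := pv_foldl_gminc_le_mem (c :: l) keys a k hk
  have hge := pv_foldl_gminc_nonneg (c :: l) keys a ha
  omega

-- B's scan computes the comparison of the two group minima
lemma pv_scan_eq (l : List Char) :
    pvScanB l =
      (if List.foldl (pvGminc l) (l.length : Int) pvPermitB < (l.length : Int)
          ∧ List.foldl (pvGminc l) (l.length : Int) pvPermitB
            ≤ List.foldl (pvGminc l) (l.length : Int) pvForbidB
       then some "Permit"
       else if List.foldl (pvGminc l) (l.length : Int) pvForbidB < (l.length : Int)
       then some "Forbid" else none) := by
  induction l with
  | nil =>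
      simp only [pvScanB, List.length_nil, Int.natCast_zero]
      rw [if_neg, if_neg]
      · have := pv_foldl_gminc_nonneg [] pvForbidB 0 (le_refl 0)
        omega
      · have := pv_foldl_gminc_nonneg [] pvPermitB 0 (le_refl 0)
        omega
  | cons c l ih =>
      have hlen : ((c :: l).length : Int) = 1 + (l.length : Int) := by
        simp [List.length_cons]; omega
      have hn0 : (0 : Int) ≤ ((c :: l).length : Int) := Int.natCast_nonneg _
      by_cases hP : pvPermitB.any (fun k => PySem.Chars.startswith (c :: l) k.toList)
      · -- a permit keyword starts at the head: scan answers Permit, and the permit min is 0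
        obtain ⟨k, hk, hks⟩ := List.any_eq_true.mp hP
        have hpre : k.toList <+: (c :: l) := (PySem.Chars.startswith_iff _ _).mp hks
        have hp0 := pv_foldl_gminc_cons_zero c l pvPermitB k hk hpre _ hn0
        have hf0 := pv_foldl_gminc_nonneg (c :: l) pvForbidB _ hn0
        rw [show pvScanB (c :: l) = some "Permit" by simp [pvScanB, hP]]
        rw [if_pos ⟨by rw [hp0]; simp, by omega⟩]
      · have hPf : ∀ k ∈ pvPermitB, ¬ k.toList <+: (c :: l) := by
          intro k hk hpre
          exact (List.any_eq_true.not.mp hP) ⟨k, hk, (PySem.Chars.startswith_iff _ _).mpr hpre⟩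
        have hpshift := pv_foldl_gminc_cons_shift c l pvPermitB hPf (l.length : Int)
        by_cases hF : pvForbidB.any (fun k => PySem.Chars.startswith (c :: l) k.toList)
        · -- only a forbid keyword starts at the head: scan answers Forbid, forbid min is 0
          obtain ⟨k, hk, hks⟩ := List.any_eq_true.mp hF
          have hpre : k.toList <+: (c :: l) := (PySem.Chars.startswith_iff _ _).mp hks
          have hf0 := pv_foldl_gminc_cons_zero c l pvForbidB k hk hpre _ hn0
          have hp1 : 0 ≤ List.foldl (pvGminc l) (l.length : Int) pvPermitB :=
            pv_foldl_gminc_nonneg l pvPermitB _ (Int.natCast_nonneg _)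
          rw [show pvScanB (c :: l) = some "Forbid" by simp [pvScanB, hP, hF]]
          rw [hlen] at hf0
          rw [hlen, hpshift, hf0, if_neg (by omega), if_pos (by omega)]
        · -- nothing starts at the head: both minima and the length shift by one
          have hFf : ∀ k ∈ pvForbidB, ¬ k.toList <+: (c :: l) := by
            intro k hk hpre
            exact (List.any_eq_true.not.mp hF) ⟨k, hk, (PySem.Chars.startswith_iff _ _).mpr hpre⟩
          have hfshift := pv_foldl_gminc_cons_shift c l pvForbidB hFf (l.length : Int)
          rw [show pvScanB (c :: l) = pvScanB l by simp [pvScanB, hP, hF]]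
          rw [ih, hlen, hpshift, hfshift]
          have hfl : List.foldl (pvGminc l) (l.length : Int) pvForbidB
              ≤ (l.length : Int) := pv_foldl_gminc_le l pvForbidB _
          split_ifs <;> first | rfl | (exfalso; omega)

-- ===== VERDICT (by name: the statement is the Claim_ definition above) =====
theorem first_compliance_result_spec : Claim_equal_first_compliance_result := by
  intro s _
  unfold Spec_first_compliance_result
  unfold first_compliance_result first_compliance_result_alt
  dsimp only []
  rw [show (fun (st : Int × String) label =>
        if PySem.Str.isIn label s then
          let idx := PySem.Str.find s label
          if idx < st.1 then (idx, label) else st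
        else st) = pvStepA s from rfl,
     List.foldl_append]
  set n := PySem.Str.len s with hn
  obtain ⟨hp1, hp2, hp3⟩ := pv_foldA s pvPermitA n "" (le_refl _)
  set stP := pvPermitA.foldl (pvStepA s) (n, "") with hstP
  set Pm := pvPermitA.foldl (pvGmin s) n with hPm
  have hPmle : Pm ≤ n := pv_foldl_gmin_le s pvPermitA n
  obtain ⟨hf1, hf2, hf3⟩ := pv_foldA s pvForbidA stP.1 stP.2 (hp1 ▸ hPmle)
  rw [show (stP.1, stP.2) = stP from rfl] at hf1 hf2 hf3
  set stF := pvForbidA.foldl (pvStepA s) stP with hstF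
  set Fm := pvForbidA.foldl (pvGmin s) n with hFm
  have hFmle : Fm ≤ n := pv_foldl_gmin_le s pvForbidA n
  have hswap : pvForbidA.foldl (pvGmin s) Pm = min Pm Fm := by
    conv_lhs => rw [show Pm = min Pm n from (min_eq_left hPmle).symm]
    rw [pv_foldl_gmin_swap]
  have hf1' : stF.1 = min Pm Fm := by rw [hf1, hp1, hswap]
  -- B's scan in terms of the same two group minima
  have hB : pvScanB s.toList
      = (if Pm < n ∧ Pm ≤ Fm then some "Permit"
         else if Fm < n then some "Forbid" else none) := by
    rw [pv_scan_eq]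
    rw [hPm, hFm, pv_gmin_eq s, hn, PySem.Str.len_eq,
        show pvPermitA = pvPermitB from rfl, show pvForbidA = pvForbidB from rfl]
  rw [hB]
  show (if pvPermitA.contains stF.2 then some "Permit"
        else if pvForbidA.contains stF.2 then some "Forbid" else none)
      = (if Pm < n ∧ Pm ≤ Fm then some "Permit"
         else if Fm < n then some "Forbid" else none)
  by_cases hFP : Fm < Pm
  · have hlt : stF.1 < stP.1 := by rw [hf1', hp1]; omega
    have hmem : stF.2 ∈ pvForbidA := hf3 hlt
    have hnotP : pvPermitA.contains stF.2 = false := by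
      have hdisj : ∀ x ∈ pvForbidA, pvPermitA.contains x = false := by decide
      exact hdisj _ hmem
    have hinF : pvForbidA.contains stF.2 = true := List.contains_iff_mem.mpr hmem
    rw [hnotP, hinF]
    simp only [Bool.false_eq_true, if_false, if_true]
    have hno : ¬ (Pm < n ∧ Pm ≤ Fm) := by omega
    rw [if_neg hno, if_pos (by omega : Fm < n)]
  · have heq : stF.1 = stP.1 := by rw [hf1', hp1]; omega
    have hlbl : stF.2 = stP.2 := hf2 heq
    by_cases hPn : Pm < n
    · have hmemP : stP.2 ∈ pvPermitA := hp3 (by rw [hp1]; omega)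
      have hinP : pvPermitA.contains stF.2 = true := by
        rw [hlbl]; exact List.contains_iff_mem.mpr hmemP
      rw [hinP]
      simp only [if_true]
      rw [if_pos ⟨hPn, by omega⟩]
    · have hPmn : Pm = n := by omega
      have hlbl0 : stP.2 = "" := hp2 (by rw [hp1]; exact hPmn)
      have hnotP : pvPermitA.contains stF.2 = false := by rw [hlbl, hlbl0]; decide
      have hnotF : pvForbidA.contains stF.2 = false := by rw [hlbl, hlbl0]; decide
      rw [hnotP, hnotF]
      simp only [Bool.false_eq_true, if_false]
      rw [if_neg (by omega : ¬ (Pm < n ∧ Pm ≤ Fm)), if_neg (by omega : ¬ Fm < n)]
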